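-- pv_equiv track=rewrite | github.com/ryan-gang/Competitive-Programming | Leetcode/Reduce_Array_Size_to_The_Half.py | minSetSizePartiallyBetter
-- ===== SOURCE A (Python) =====
-- from collections import Counter
-- from typing import List
--
-- def minSetSizePartiallyBetter(nums: List[int]) -> int:
--     count = Counter(nums)
--     totalFrequency, size = 0, 0
--     # Less space requirement.
--     for frequency in sorted(count.values(), reverse=True):
--         totalFrequency += frequency
--         size += 1
--         if totalFrequency >= len(nums) // 2:
--             break
--
--     return size
-- ===== SOURCE B (Python) =====
-- from collections import Counter
-- from typing import List
--
--
-- def minSetSizePartiallyBetter(nums: List[int]) -> int: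
--     # Counting-sort idea: bucket the frequencies by their value and walk the
--     # buckets from the highest possible frequency down -- no comparison sort.
--     n = len(nums)
--     half = n // 2
--     freq_of_freq = Counter(Counter(nums).values())
--     removed, size = 0, 0
--     for f in range(n, 0, -1):
--         for _ in range(freq_of_freq[f]):
--             removed += f
--             size += 1
--             if removed >= half:
--                 return size
--     return size
-- ===== Notes on version B (the rewrite author's own statement) =====
-- stated objective: alternative
-- what changed: Replaces A's comparison sort of the frequency list by a counting-sort walk: a Counter of frequencies is read as buckets from the highest possible frequency n down to 1, accumulating until half the array is covered.
import Mathlib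
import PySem

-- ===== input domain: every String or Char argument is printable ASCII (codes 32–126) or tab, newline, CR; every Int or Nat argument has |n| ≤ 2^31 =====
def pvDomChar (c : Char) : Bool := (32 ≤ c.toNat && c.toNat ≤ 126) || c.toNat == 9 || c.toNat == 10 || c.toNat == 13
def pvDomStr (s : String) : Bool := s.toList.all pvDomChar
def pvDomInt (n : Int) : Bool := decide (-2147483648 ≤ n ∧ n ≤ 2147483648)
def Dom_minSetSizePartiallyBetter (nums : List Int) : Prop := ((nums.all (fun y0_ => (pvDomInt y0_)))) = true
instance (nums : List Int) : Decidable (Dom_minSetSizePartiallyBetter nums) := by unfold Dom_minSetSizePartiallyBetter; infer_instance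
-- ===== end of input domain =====

-- B replaces A's comparison sort of the frequencies by counting buckets walked
-- from the highest frequency down (counting sort); same return value everywhere.

-- ===== PORT A =====
-- A's for-loop with break, over the descending-sorted frequency list
def pvLoopA (fs : List Int) (half : Int) (total size : Int) : Int :=
  match fs with
  | [] => size
  | f :: rest =>
    if total + f ≥ half then size + 1 else pvLoopA rest half (total + f) (size + 1)

def minSetSizePartiallyBetter (nums : List Int) : Int :=
  let count := PySem.Dict.counter nums
  pvLoopA (PySem.List.sorted count.values (fun x => x) true)
    (PySem.Int.floordiv (nums.length : Int) 2) 0 0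

-- ===== PORT B =====
-- inner loop 'for _ in range(freq_of_freq[f])'; .inl = early return, .inr = continue
def pvLoopInner (f : Int) (c : Nat) (half removed size : Int) : Sum Int (Int × Int) :=
  match c with
  | 0 => .inr (removed, size)
  | c + 1 =>
    if removed + f ≥ half then .inl (size + 1)
    else pvLoopInner f c half (removed + f) (size + 1)

-- outer loop 'for f in range(n, 0, -1)'
def pvLoopB (fs : List Int) (d : PySem.Dict Int Int) (half removed size : Int) : Int :=
  match fs with
  | [] => size
  | f :: rest =>
    match pvLoopInner f (d.getD f 0).toNat half removed size with
    | .inl out => out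
    | .inr (r, s) => pvLoopB rest d half r s

def minSetSizePartiallyBetter_alt (nums : List Int) : Int :=
  let n : Int := (nums.length : Int)
  let half := PySem.Int.floordiv n 2
  let freqOfFreq := PySem.Dict.counter (PySem.Dict.counter nums).values
  pvLoopB (PySem.List.pyRange n 0 (-1)) freqOfFreq half 0 0

-- ===== PRECONDITION & SPEC =====
def Spec_minSetSizePartiallyBetter (nums : List Int) (out : Int) : Prop := out = minSetSizePartiallyBetter_alt nums
instance (nums : List Int) (out : Int) : Decidable (Spec_minSetSizePartiallyBetter nums out) := by unfold Spec_minSetSizePartiallyBetter; infer_instance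

-- ===== CLAIM (what is proved, stated in full; the proofs are below) =====
def Claim_equal_minSetSizePartiallyBetter : Prop := ∀ (nums : List Int), Dom_minSetSizePartiallyBetter nums → Spec_minSetSizePartiallyBetter nums (minSetSizePartiallyBetter nums)

-- ===== LEMMAS AND PROOFS =====

-- the inner loop on c copies of f behaves like A's loop on 'replicate c f' prefixed to any tail
theorem pvLoopInner_spec (c : Nat) (f half : Int) :
    ∀ (r s : Int) (tail : List Int),
      (match pvLoopInner f c half r s with
        | .inl out => out
        | .inr (r', s') => pvLoopA tail half r' s')
      = pvLoopA (List.replicate c f ++ tail) half r s := by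
  induction c with
  | zero => intro r s tail; simp [pvLoopInner]
  | succ c ih =>
    intro r s tail
    simp only [List.replicate_succ, List.cons_append, pvLoopInner, pvLoopA]
    split_ifs with h
    · rfl
    · exact ih (r + f) (s + 1) tail

-- B's double loop is A's loop over the bucket expansion
theorem pvLoopB_eq_pvLoopA (fs : List Int) (d : PySem.Dict Int Int) (half : Int) :
    ∀ (r s : Int),
      pvLoopB fs d half r s
        = pvLoopA (fs.flatMap (fun f => List.replicate (d.getD f 0).toNat f)) half r s := by
  induction fs with
  | nil => intro r s; rfl
  | cons f rest ih =>
    intro r s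
    simp only [List.flatMap_cons, pvLoopB]
    rw [← pvLoopInner_spec]
    cases pvLoopInner f (d.getD f 0).toNat half r s with
    | inl out => rfl
    | inr p => exact ih p.1 p.2

-- counting in the bucket expansion of a duplicate-free list of bucket indices
theorem count_flatMap_replicate (fs : List Int) (c : Int → Nat) (hnd : fs.Nodup) (x : Int) :
    (fs.flatMap (fun f => List.replicate (c f) f)).count x = if x ∈ fs then c x else 0 := by
  induction fs with
  | nil => simp
  | cons f rest ih =>
    simp only [List.flatMap_cons, List.count_append, List.nodup_cons] at *
    rw [ih hnd.2, List.count_replicate]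
    by_cases hx : x = f
    · subst hx; simp [hnd.1]
    · simp [hx, Ne.symm hx]

-- the bucket expansion of a strictly decreasing index list is sorted non-increasingly
theorem pairwise_flatMap_replicate (fs : List Int) (c : Int → Nat)
    (h : fs.Pairwise (· > ·)) :
    (fs.flatMap (fun f => List.replicate (c f) f)).Pairwise (· ≥ ·) := by
  induction fs with
  | nil => simp
  | cons f rest ih =>
    rw [List.pairwise_cons] at h
    simp only [List.flatMap_cons]
    rw [List.pairwise_append]
    refine ⟨?_, ?_, ?_⟩
    · exact List.pairwise_replicate.mpr (Or.inr le_rfl)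
    · exact ih h.2
    · intro a ha b hb
      rw [List.eq_of_mem_replicate ha]
      rw [List.mem_flatMap] at hb
      obtain ⟨g, hg, hbg⟩ := hb
      rw [List.eq_of_mem_replicate hbg]
      exact le_of_lt (h.1 g hg)

-- every value of Counter(nums) is a count: positive and at most len(nums)
theorem counter_values_bounds (nums : List Int) :
    ∀ v ∈ (PySem.Dict.counter nums).values, 0 < v ∧ v ≤ (nums.length : Int) := by
  intro v hv
  rw [PySem.Dict.values_eq_map_keys _ (PySem.Dict.nodup_keys_counter nums) 0] at hv
  rw [List.mem_map] at hv
  obtain ⟨k, hk, hkv⟩ := hv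
  rw [PySem.Dict.getD_counter] at hkv
  rw [PySem.Dict.keys_counter, PySem.Set.mem_ofList] at hk
  subst hkv
  constructor
  · exact_mod_cast List.count_pos_iff.mpr hk
  · exact_mod_cast List.count_le_length

-- the bucket expansion over range(n, 0, -1) IS sorted(values, reverse=True)
theorem expansion_eq_sorted (nums : List Int) :
    (PySem.List.pyRange (nums.length : Int) 0 (-1)).flatMap
        (fun f => List.replicate (((PySem.Dict.counter (PySem.Dict.counter nums).values).getD f 0)).toNat f)
      = PySem.List.sorted (PySem.Dict.counter nums).values (fun x => x) true := by
  set vs := (PySem.Dict.counter nums).values with hvs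
  have hcnt : ∀ f : Int, (((PySem.Dict.counter vs).getD f 0)).toNat = vs.count f := by
    intro f; rw [PySem.Dict.getD_counter]; exact Int.toNat_natCast _
  have hnd : (PySem.List.pyRange (nums.length : Int) 0 (-1)).Nodup := by
    rw [PySem.List.pyRange_neg_one_eq_reverse, List.nodup_reverse]
    exact PySem.List.nodup_pyRange_one _ _
  have hpw : (PySem.List.pyRange (nums.length : Int) 0 (-1)).Pairwise (· > ·) := by
    rw [PySem.List.pyRange_neg_one_eq_reverse, List.pairwise_reverse]
    exact List.Pairwise.imp (fun h => h) (PySem.List.pairwise_lt_pyRange_one _ _)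
  have hperm : ((PySem.List.pyRange (nums.length : Int) 0 (-1)).flatMap
      (fun f => List.replicate (((PySem.Dict.counter vs).getD f 0)).toNat f)).Perm vs := by
    rw [List.perm_iff_count]
    intro x
    rw [count_flatMap_replicate _ _ hnd x]
    by_cases hx : x ∈ PySem.List.pyRange (nums.length : Int) 0 (-1)
    · simp [hx]
    · simp only [hx, if_false]
      rw [PySem.List.mem_pyRange_neg_one] at hx
      symm
      rw [List.count_eq_zero]
      intro hmem
      exact hx ⟨(counter_values_bounds nums x hmem).1, (counter_values_bounds nums x hmem).2⟩
  refine PySem.List.eq_of_perm_of_pairwise_le_of_injective (fun x => -x) neg_injective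
    (hperm.trans (PySem.List.sorted_perm vs (fun x => x) true).symm) ?_ ?_
  · have := pairwise_flatMap_replicate _ (fun f => ((PySem.Dict.counter vs).getD f 0).toNat) hpw
    exact List.Pairwise.imp (fun h => neg_le_neg h) this
  · have := PySem.List.sorted_pairwise_rev vs (fun x => x)
    exact List.Pairwise.imp (fun h => neg_le_neg h) this

-- ===== VERDICT (by name: the statement is the Claim_ definition above) =====
theorem minSetSizePartiallyBetter_spec : Claim_equal_minSetSizePartiallyBetter := by
  intro nums _
  unfold Spec_minSetSizePartiallyBetter minSetSizePartiallyBetter minSetSizePartiallyBetter_alt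
  rw [pvLoopB_eq_pvLoopA, expansion_eq_sorted]
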